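/- GENERATED by farm/mkstatement.py from design/units.tsv (unit `InternalRead`) and the Specs of Gif/Spec/*.lean — do not edit.
   THE STATEMENT of the proof unit `InternalRead`: the function `InternalRead` (35 instructions) satisfies its contract,
   given the contracts of its callees. What the names mean: ProgX/Base/Spec/Basic.lean. The theorem to prove:
   `theorem InternalRead_ok : Gif.Spec.InternalRead.Statement`. -/
import Gif.Code
import Gif.Dec.All
import Gif.Labels
import Gif.Spec.Reader
namespace Gif.Spec.InternalRead
open X86 X86.User Asan

/-- The statement of unit `InternalRead`. -/
def Statement : Prop :=
  ∀ (Lay : Layout) (_hLay : Lay.hi = 0x1000000) (μ : Microarch) (_hμ : UserX.MicroOK μ) (u₀ : State)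
    (_hcode : HasCodeNat Lay u₀ Gif.L.InternalRead.entry Gif.Code.code_InternalRead.nat Gif.L.InternalRead.size)
    (_h_asan_load8_noabort : Asan.SmallCheck Lay μ ProgX.Base.WayInv (ProgX.Base.CodeOK u₀) [.rax, .rcx, .rdx] 8 ProgX.Base.L.__asan_load8_noabort.entry)
    (_h_mem_read : ∀ (H : Heap) (rest : List Obj) (frames : List (Nat × FrameLayout)) (F : Forest) (R : Rd) (n : Nat), Calls Lay μ ProgX.Base.WayInv (ProgX.Base.conv u₀) Gif.L.mem_read.entry (Gif.Spec.mem_read.spec H rest frames F R n)),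
    ∀ (H : Heap) (rest : List Obj) (frames : List (Nat × FrameLayout)) (F : Forest) (R : Rd) (n : Nat), Calls Lay μ ProgX.Base.WayInv (ProgX.Base.conv u₀) Gif.L.InternalRead.entry (Gif.Spec.InternalRead.spec H rest frames F R n)

end Gif.Spec.InternalRead
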